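-- pv_equiv track=rewrite | github.com/zoologov/beadloom | src/beadloom/onboarding/doc_generator.py | _render_symbols_section
-- ===== SOURCE A (Python) =====
-- from typing import TYPE_CHECKING, Any
--
-- def _render_symbols_section(symbols: list[dict[str, Any]]) -> str:
--     """Render a ``## Public API`` markdown table from *symbols*.
--
--     Filters out private symbols (leading ``_``) and deduplicates.
--     Returns empty string when no public symbols are found.
--     """
--     if not symbols:
--         return ""
--     public: list[dict[str, Any]] = []
--     seen: set[str] = set()
--     for s in symbols:
--         name = s.get("symbol_name", "")
--         if name.startswith("_") or name in seen:
--             continue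
--         seen.add(name)
--         public.append(s)
--     if not public:
--         return ""
--     lines = [
--         "## Public API\n",
--         "| Symbol | Kind |",
--         "|--------|------|",
--     ]
--     for s in sorted(public, key=lambda x: x.get("symbol_name", "")):
--         lines.append(f"| `{s['symbol_name']}` | {s.get('kind', '')} |")
--     return "\n".join(lines) + "\n"
-- ===== SOURCE B (Python) =====
-- def _render_symbols_section(symbols):
--     """Render a ``## Public API`` markdown table from *symbols*.
--
--     Different decomposition: filter publics with no dedup, stable-sort them by
--     name, then dedup adjacent equal names in one walk (stability keeps each
--     name's first-seen entry, matching A's first-occurrence semantics).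
--     """
--     candidates = [s for s in symbols if not s.get("symbol_name", "").startswith("_")]
--     candidates.sort(key=lambda x: x.get("symbol_name", ""))
--     kept = []
--     prev = None
--     for s in candidates:
--         name = s.get("symbol_name", "")
--         if prev != name:
--             kept.append(s)
--             prev = name
--     if not kept:
--         return ""
--     lines = [
--         "## Public API\n",
--         "| Symbol | Kind |",
--         "|--------|------|",
--     ]
--     for s in kept:
--         lines.append(f"| `{s['symbol_name']}` | {s.get('kind', '')} |")
--     return "\n".join(lines) + "\n"
-- ===== Notes on version B (the rewrite author's own statement) =====
-- stated objective: alternative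
-- what changed: B drops A's seen-set dedup-before-sort entirely: it filters publics with no deduplication, stable-sorts them by name, and removes duplicates in a single adjacent-equal walk over the sorted list (stability makes the survivor of each group the first occurrence).
-- outside the precondition, e.g. on _render_symbols_section([{'kind': 'f'}]): A raises KeyError, B raises KeyError
import Mathlib
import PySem

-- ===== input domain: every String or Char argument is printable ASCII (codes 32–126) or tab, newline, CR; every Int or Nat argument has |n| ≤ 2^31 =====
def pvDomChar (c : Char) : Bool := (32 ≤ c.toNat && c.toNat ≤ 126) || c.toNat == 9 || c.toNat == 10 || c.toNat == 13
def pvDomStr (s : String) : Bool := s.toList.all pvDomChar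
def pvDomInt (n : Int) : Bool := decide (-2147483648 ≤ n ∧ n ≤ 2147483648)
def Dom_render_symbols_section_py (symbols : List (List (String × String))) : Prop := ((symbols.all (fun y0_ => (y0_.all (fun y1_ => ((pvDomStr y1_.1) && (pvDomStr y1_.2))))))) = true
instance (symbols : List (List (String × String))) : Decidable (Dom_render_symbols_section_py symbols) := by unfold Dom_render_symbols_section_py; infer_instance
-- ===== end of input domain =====

-- B replaces A's seen-set dedup-before-sort by filter, stable sort by name, then a single
-- adjacent-equal dedup walk over the sorted list (alternative decomposition, same cost);
-- equivalence of return values on Pre_ (A raises outside it, so does B).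

-- ===== PORT A =====
-- s.get("symbol_name", "")
def pvName (s : List (String × String)) : String :=
  PySem.Dict.getD (PySem.Dict.mk s) "symbol_name" ""

-- s.get("kind", "")
def pvKind (s : List (String × String)) : String :=
  PySem.Dict.getD (PySem.Dict.mk s) "kind" ""

-- loop body of A: skip private/seen names, else append to public and mark seen
def pvStepA (acc : List (List (String × String)) × PySem.Set String) (s : List (String × String)) :
    List (List (String × String)) × PySem.Set String :=
  if PySem.Str.startswith (pvName s) "_" || PySem.Set.contains acc.2 (pvName s) then acc
  else (acc.1 ++ [s], PySem.Set.add acc.2 (pvName s))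

-- the row f-string; s["symbol_name"] raises KeyError outside Pre_, totalized
-- with .getD "" (exact on every input admitted by Pre_)
def pvRowA (s : List (String × String)) : String :=
  "| `" ++ ((PySem.Dict.get? (PySem.Dict.mk s) "symbol_name").getD "") ++ "` | " ++ pvKind s ++ " |"

def render_symbols_section_py (symbols : List (List (String × String))) : String :=
  if symbols = [] then ""
  else
    let st := symbols.foldl pvStepA ([], PySem.Set.empty)
    if st.1 = [] then ""
    else
      let lines := ["## Public API\n", "| Symbol | Kind |", "|--------|------|"]
        ++ (PySem.List.sorted st.1 (fun x => pvName x) false).map pvRowA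
      PySem.Str.join "\n" lines ++ "\n"

-- ===== PORT B =====
-- the comprehension's filter: not s.get("symbol_name", "").startswith("_")
def pvPublicPred (s : List (String × String)) : Bool :=
  !(PySem.Str.startswith (pvName s) "_")

-- loop body of B's adjacent-dedup walk: keep s when its name differs from prev
def pvStepD (acc : List (List (String × String)) × Option String) (s : List (String × String)) :
    List (List (String × String)) × Option String :=
  if acc.2 ≠ some (pvName s) then (acc.1 ++ [s], some (pvName s)) else acc

def render_symbols_section_py_alt (symbols : List (List (String × String))) : String :=
  let candidates := symbols.filter pvPublicPred
  let sortedC := PySem.List.sorted candidates (fun x => pvName x) false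
  let kept := (sortedC.foldl pvStepD ([], none)).1
  if kept = [] then ""
  else
    PySem.Str.join "\n" (["## Public API\n", "| Symbol | Kind |", "|--------|------|"]
      ++ kept.map pvRowA) ++ "\n"

-- ===== PRECONDITION & SPEC =====
-- Pre_ excludes exactly the inputs where A raises KeyError: the first dict whose
-- symbol_name defaults to "" lacks the "symbol_name" key, is kept as public, and
-- A then evaluates s["symbol_name"] on it (B raises on the same entry).
def Pre_render_symbols_section_py (symbols : List (List (String × String))) : Prop :=
  ((symbols.find? (fun s => pvName s == "")).all
    (fun s => (PySem.Dict.get? (PySem.Dict.mk s) "symbol_name").isSome)) = true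

instance (symbols : List (List (String × String))) : Decidable (Pre_render_symbols_section_py symbols) := by
  unfold Pre_render_symbols_section_py; infer_instance

def pvWitness_render_symbols_section_py : (List (List (String × String))) :=
  [[("symbol_name", "beta"), ("kind", "class")], [("symbol_name", "alpha")], [("symbol_name", "_p")]]

def Spec_render_symbols_section_py (symbols : List (List (String × String))) (out : String) : Prop := out = render_symbols_section_py_alt symbols
instance (symbols : List (List (String × String))) (out : String) : Decidable (Spec_render_symbols_section_py symbols out) := by unfold Spec_render_symbols_section_py; infer_instance

-- ===== CLAIM (what is proved, stated in full; the proofs are below) =====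
def Claim_equal_render_symbols_section_py : Prop := ∀ (symbols : List (List (String × String))), Dom_render_symbols_section_py symbols → Pre_render_symbols_section_py symbols → Spec_render_symbols_section_py symbols (render_symbols_section_py symbols)

-- ===== LEMMAS AND PROOFS =====

-- A's loop as a recursion over the remaining input
def pvG (seen : PySem.Set String) : List (List (String × String)) → List (List (String × String))
  | [] => []
  | s :: t =>
    if PySem.Str.startswith (pvName s) "_" || PySem.Set.contains seen (pvName s) then pvG seen t
    else s :: pvG (PySem.Set.add seen (pvName s)) t

-- B's adjacent-dedup loop as a recursion over the remaining input
def pvH (prev : Option String) : List (List (String × String)) → List (List (String × String))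
  | [] => []
  | s :: t => if prev ≠ some (pvName s) then s :: pvH (some (pvName s)) t else pvH prev t

def pvByName (k : String) (s : List (String × String)) : Bool := pvName s == k

def pvPrevLe (prev : Option String) (s : List (String × String)) : Prop :=
  ∀ p, prev = some p → p ≤ pvName s

def pvPrevLt (prev : Option String) (s : List (String × String)) : Prop :=
  ∀ p, prev = some p → p < pvName s

lemma pvFoldA (l : List (List (String × String))) :
    ∀ (pub : List (List (String × String))) (seen : PySem.Set String),
    (l.foldl pvStepA (pub, seen)).1 = pub ++ pvG seen l := by
  induction l with
  | nil => intro pub seen; simp [pvG]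
  | cons s t ih =>
    intro pub seen
    by_cases h : (PySem.Str.startswith (pvName s) "_" || PySem.Set.contains seen (pvName s)) = true
    · simp only [List.foldl_cons, pvStepA, pvG, h, if_true]
      exact ih pub seen
    · simp only [List.foldl_cons, pvStepA, pvG, h, Bool.false_eq_true, if_false]
      rw [ih (pub ++ [s]) (PySem.Set.add seen (pvName s))]
      simp
  
lemma pvFoldD (l : List (List (String × String))) :
    ∀ (acc : List (List (String × String))) (prev : Option String),
    (l.foldl pvStepD (acc, prev)).1 = acc ++ pvH prev l := by
  induction l with
  | nil => intro acc prev; simp [pvH]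
  | cons s t ih =>
    intro acc prev
    by_cases h : prev ≠ some (pvName s)
    · simp only [List.foldl_cons, pvStepD, pvH, if_pos h]
      rw [ih (acc ++ [s]) (some (pvName s))]
      simp
    · simp only [List.foldl_cons, pvStepD, pvH, if_neg h]
      exact ih acc prev

-- filter characterization of A's public list: the first public occurrence per name
lemma pvGFilter (l : List (List (String × String))) :
    ∀ (seen : PySem.Set String) (k : String),
    (pvG seen l).filter (pvByName k)
      = if k ∈ seen then [] else ((l.filter pvPublicPred).filter (pvByName k)).take 1 := by
  induction l with
  | nil => intro seen k; by_cases h : k ∈ seen <;> simp [pvG, h]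
  | cons s t ih =>
    intro seen k
    by_cases hpriv : PySem.Str.startswith (pvName s) "_" = true
    · have hc : (PySem.Str.startswith (pvName s) "_" || PySem.Set.contains seen (pvName s)) = true := by
        rw [hpriv]; simp
      have hpub : pvPublicPred s = false := by simp only [pvPublicPred, hpriv]; rfl
      simp only [pvG, hc, if_true, List.filter_cons, hpub]
      simpa using ih seen k
    · replace hpriv : PySem.Str.startswith (pvName s) "_" = false := by simpa using hpriv
      have hpub : pvPublicPred s = true := by simp only [pvPublicPred, hpriv]; rfl
      by_cases hseen : pvName s ∈ seen
      · have hc : (PySem.Str.startswith (pvName s) "_" || PySem.Set.contains seen (pvName s)) = true := by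
          have h1 : PySem.Set.contains seen (pvName s) = true := (PySem.Set.contains_iff _ _).mpr hseen
          rw [h1]; simp
        simp only [pvG, hc, if_true]
        rw [ih seen k]
        by_cases hk : k ∈ seen
        · rw [if_pos hk, if_pos hk]
        · rw [if_neg hk, if_neg hk]
          have hne : pvByName k s = false := by
            simp only [pvByName]
            have : pvName s ≠ k := fun h => hk (h ▸ hseen)
            simpa using this
          rw [List.filter_cons_of_pos hpub, List.filter_cons_of_neg (by simp [hne])]
      · have hc : (PySem.Str.startswith (pvName s) "_" || PySem.Set.contains seen (pvName s)) = false := by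
          have h1 : PySem.Set.contains seen (pvName s) = false := by
            rw [Bool.eq_false_iff]
            intro h
            exact hseen ((PySem.Set.contains_iff _ _).mp h)
          rw [h1, hpriv]; simp
        simp only [pvG, hc, Bool.false_eq_true, if_false]
        by_cases hk : k = pvName s
        · have hb : pvByName k s = true := by simp [pvByName, hk]
          rw [List.filter_cons_of_pos hb, ih (PySem.Set.add seen (pvName s)) k]
          have hmem : k ∈ PySem.Set.add seen (pvName s) := by
            rw [PySem.Set.mem_add]; right; exact hk
          rw [if_pos hmem, if_neg (hk ▸ hseen),
            List.filter_cons_of_pos hpub, List.filter_cons_of_pos hb]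
          simp
        · have hb : pvByName k s = false := by
            simp only [pvByName]
            simpa using fun h => hk h.symm
          rw [List.filter_cons_of_neg (by simp [hb]), ih (PySem.Set.add seen (pvName s)) k]
          have hiff : (k ∈ PySem.Set.add seen (pvName s)) ↔ k ∈ seen := by
            rw [PySem.Set.mem_add]
            constructor
            · rintro (h | h)
              · exact h
              · exact absurd h hk
            · exact Or.inl
          by_cases hks : k ∈ seen
          · rw [if_pos (hiff.mpr hks), if_pos hks]
          · rw [if_neg (fun h => hks (hiff.mp h)), if_neg hks,
              List.filter_cons_of_pos hpub, List.filter_cons_of_neg (by simp [hb])]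

-- A's public list has pairwise-distinct names, none of them already seen
lemma pvGNodup (l : List (List (String × String))) :
    ∀ (seen : PySem.Set String),
    ((pvG seen l).map pvName).Nodup ∧ ∀ s ∈ pvG seen l, pvName s ∉ seen := by
  induction l with
  | nil => intro seen; simp [pvG]
  | cons s t ih =>
    intro seen
    by_cases hc : (PySem.Str.startswith (pvName s) "_" || PySem.Set.contains seen (pvName s)) = true
    · simp only [pvG, hc, if_true]; exact ih seen
    · simp only [pvG, hc, Bool.false_eq_true, if_false]
      obtain ⟨hnd, hmem⟩ := ih (PySem.Set.add seen (pvName s))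
      constructor
      · simp only [List.map_cons, List.nodup_cons]
        refine ⟨?_, hnd⟩
        intro h
        obtain ⟨y, hy, hyn⟩ := List.mem_map.mp h
        have h2 := hmem y hy
        rw [PySem.Set.mem_add] at h2
        exact h2 (Or.inr hyn)
      · intro y hy
        rcases List.mem_cons.mp hy with rfl | hy
        · intro h
          have h1 : PySem.Set.contains seen (pvName y) = true := (PySem.Set.contains_iff _ _).mpr h
          rw [h1] at hc; simp at hc
        · intro h
          have h2 := hmem y hy
          rw [PySem.Set.mem_add] at h2
          exact h2 (Or.inl h)

-- the kept rows of B are strictly increasing by name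
lemma pvHPairwise (l : List (List (String × String))) :
    ∀ (prev : Option String),
    l.Pairwise (fun a b => pvName a ≤ pvName b) → (∀ s ∈ l, pvPrevLe prev s) →
    (pvH prev l).Pairwise (fun a b => pvName a < pvName b) ∧ ∀ s ∈ pvH prev l, pvPrevLt prev s := by
  induction l with
  | nil => intro prev _ _; simp [pvH]
  | cons s t ih =>
    intro prev hpw hle
    have hpt : t.Pairwise (fun a b => pvName a ≤ pvName b) := hpw.of_cons
    have hst : ∀ y ∈ t, pvName s ≤ pvName y := fun y hy => List.rel_of_pairwise_cons hpw hy
    by_cases h : prev = some (pvName s)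
    · have hne : ¬ prev ≠ some (pvName s) := by simp [h]
      simp only [pvH, if_neg hne]
      exact ih prev hpt (fun y hy p hp => by
        rw [h] at hp; injection hp with h'; exact h' ▸ hst y hy)
    · simp only [pvH, if_pos h]
      obtain ⟨hpw', hlt'⟩ := ih (some (pvName s)) hpt
        (fun y hy p hp => by injection hp with h'; exact h' ▸ hst y hy)
      refine ⟨List.Pairwise.cons ?_ hpw', ?_⟩
      · intro y hy
        exact (hlt' y hy) (pvName s) rfl
      · intro y hy
        rcases List.mem_cons.mp hy with rfl | hy
        · intro p hp
          subst hp
          have h1 : p ≤ pvName y := hle y (by simp) p rfl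
          have h2 : p ≠ pvName y := fun he => h (by rw [he])
          exact lt_of_le_of_ne h1 h2
        · intro p hp
          subst hp
          have h1 : p ≤ pvName s := hle s (by simp) p rfl
          exact lt_of_le_of_lt h1 ((hlt' y hy) (pvName s) rfl)

-- filter characterization of B's dedup walk: the first element of each name block
lemma pvHFilter (l : List (List (String × String))) :
    ∀ (prev : Option String) (k : String),
    l.Pairwise (fun a b => pvName a ≤ pvName b) → (∀ s ∈ l, pvPrevLe prev s) →
    (pvH prev l).filter (pvByName k)
      = if prev = some k then [] else (l.filter (pvByName k)).take 1 := by
  induction l with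
  | nil =>
    intro prev k _ _
    by_cases h : prev = some k <;> simp [pvH, h]
  | cons s t ih =>
    intro prev k hpw hle
    have hpt : t.Pairwise (fun a b => pvName a ≤ pvName b) := hpw.of_cons
    have hst : ∀ y ∈ t, pvName s ≤ pvName y := fun y hy => List.rel_of_pairwise_cons hpw hy
    by_cases h : prev = some (pvName s)
    · -- s is skipped
      have hne : ¬ prev ≠ some (pvName s) := by simp [h]
      simp only [pvH, if_neg hne]
      rw [ih prev k hpt (fun y hy p hp => by
        rw [h] at hp; injection hp with h'; exact h' ▸ hst y hy)]
      by_cases hk : prev = some k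
      · rw [if_pos hk, if_pos hk]
      · rw [if_neg hk, if_neg hk]
        have hb : pvByName k s = false := by
          simp only [pvByName]
          have : pvName s ≠ k := fun he => hk (h.trans (by rw [he]))
          simpa using this
        rw [List.filter_cons_of_neg (by simp [hb])]
    · -- s is kept
      simp only [pvH, if_pos h]
      by_cases hk : k = pvName s
      · have hb : pvByName k s = true := by simp [pvByName, hk]
        rw [List.filter_cons_of_pos hb,
          ih (some (pvName s)) k hpt (fun y hy p hp => by injection hp with h'; exact h' ▸ hst y hy),
          if_pos (by rw [hk]), if_neg (fun he => h (hk ▸ he)), List.filter_cons_of_pos hb]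
        simp
      · have hb : pvByName k s = false := by
          simp only [pvByName]
          simpa using fun he => hk he.symm
        rw [List.filter_cons_of_neg (by simp [hb]),
          ih (some (pvName s)) k hpt (fun y hy p hp => by injection hp with h'; exact h' ▸ hst y hy),
          if_neg (fun he => hk (by injection he with h'; exact h'.symm))]
        by_cases hp : prev = some k
        · rw [if_pos hp]
          have h1 : k ≤ pvName s := hle s (by simp) k hp
          have h2 : k ≠ pvName s := fun he => h (hp.trans (by rw [he]))
          have h3 : k < pvName s := lt_of_le_of_ne h1 h2
          have htf : t.filter (pvByName k) = [] := by
            rw [List.filter_eq_nil_iff]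
            intro y hy
            have h4 : k < pvName y := lt_of_lt_of_le h3 (hst y hy)
            simp only [pvByName]
            simpa using (ne_of_gt h4)
          rw [htf]
          simp
        · rw [if_neg hp, List.filter_cons_of_neg (by simp [hb])]

-- insertBy splits the list at the first element the new one goes before
lemma pvInsertByEq (before : List (String × String) → List (String × String) → Bool)
    (x : List (String × String)) (l : List (List (String × String))) :
    PySem.List.insertBy before x l
      = l.takeWhile (fun y => !(before x y)) ++ x :: l.dropWhile (fun y => !(before x y)) := by
  induction l with
  | nil => rfl
  | cons y ys ih =>
    by_cases h : before x y = true
    · simp [PySem.List.insertBy, h]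
    · replace h : before x y = false := by simpa using h
      simp [PySem.List.insertBy, h, ih]

-- everything dropped past the insertion point has a strictly larger name
lemma pvDropAll (x : List (String × String)) (l : List (List (String × String)))
    (hpw : l.Pairwise (fun a b => pvName a ≤ pvName b)) :
    ∀ y ∈ l.dropWhile (fun y => !(decide (pvName x < pvName y))), pvName x < pvName y := by
  induction l with
  | nil => simp
  | cons a t ih =>
    rw [List.dropWhile_cons]
    by_cases h : pvName x < pvName a
    · have hp : (!(decide (pvName x < pvName a))) = false := by simp [h]
      rw [hp]
      simp only [Bool.false_eq_true, if_false]
      intro y hy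
      rcases List.mem_cons.mp hy with rfl | hy
      · exact h
      · exact lt_of_lt_of_le h (List.rel_of_pairwise_cons hpw hy)
    · have hp : (!(decide (pvName x < pvName a))) = true := by simp [h]
      rw [hp, if_pos rfl]
      exact ih hpw.of_cons

-- STABILITY of the insertion sort: the per-name filter is preserved
lemma pvSortStable (xs : List (List (String × String))) :
    ∀ k, (PySem.List.sorted xs (fun s => pvName s) false).filter (pvByName k)
      = xs.filter (pvByName k) := by
  induction xs using List.reverseRecOn with
  | nil => intro k; rfl
  | append_singleton xs x ih =>
    intro k
    have hfold : PySem.List.sorted (xs ++ [x]) (fun s => pvName s) false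
        = PySem.List.insertBy (fun a b => decide (pvName a < pvName b)) x
            (PySem.List.sorted xs (fun s => pvName s) false) := by
      rw [PySem.List.sorted_eq_foldl_insertBy, PySem.List.sorted_eq_foldl_insertBy,
        List.foldl_append]
      rfl
    have hpw : (PySem.List.sorted xs (fun s => pvName s) false).Pairwise
        (fun a b => pvName a ≤ pvName b) := PySem.List.sorted_pairwise xs (fun s => pvName s)
    rw [hfold, pvInsertByEq, List.filter_append]
    by_cases hb : pvByName k x = true
    · have hkx : pvName x = k := by simpa [pvByName] using hb
      have hD : ((PySem.List.sorted xs (fun s => pvName s) false).dropWhile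
          (fun y => !((fun a b => decide (pvName a < pvName b)) x y))).filter (pvByName k) = [] := by
        rw [List.filter_eq_nil_iff]
        intro y hy
        have h4 : pvName x < pvName y := pvDropAll x _ hpw y hy
        simp only [pvByName]
        rw [hkx] at h4
        simpa using (ne_of_gt h4)
      have hTD : ((PySem.List.sorted xs (fun s => pvName s) false).takeWhile
            (fun y => !((fun a b => decide (pvName a < pvName b)) x y))).filter (pvByName k)
          = (PySem.List.sorted xs (fun s => pvName s) false).filter (pvByName k) := by
        conv_rhs => rw [← List.takeWhile_append_dropWhile
          (p := fun y => !((fun a b => decide (pvName a < pvName b)) x y))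
          (l := PySem.List.sorted xs (fun s => pvName s) false)]
        rw [List.filter_append, hD, List.append_nil]
      rw [List.filter_cons_of_pos hb, hD, hTD, ih k, List.filter_append,
        List.filter_cons_of_pos hb, List.filter_nil]
    · have hbf : pvByName k x = false := by simpa using hb
      rw [List.filter_cons_of_neg (by simp [hbf]),
        ← List.filter_append, List.takeWhile_append_dropWhile, ih k,
        List.filter_append, List.filter_cons_of_neg (by simp [hbf]),
        List.filter_nil, List.append_nil]

-- equal per-name filters give equal membership
lemma pvMemOfFilterEq {l1 l2 : List (List (String × String))}
    (h : ∀ k, l1.filter (pvByName k) = l2.filter (pvByName k)) :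
    ∀ x, x ∈ l1 ↔ x ∈ l2 := by
  intro x
  constructor <;> intro hx
  · have h1 : x ∈ l1.filter (pvByName (pvName x)) :=
      List.mem_filter.mpr ⟨hx, by simp [pvByName]⟩
    rw [h] at h1
    exact (List.mem_filter.mp h1).1
  · have h1 : x ∈ l2.filter (pvByName (pvName x)) :=
      List.mem_filter.mpr ⟨hx, by simp [pvByName]⟩
    rw [← h] at h1
    exact (List.mem_filter.mp h1).1

-- the two ports agree on every input (the totalized row helper included)
lemma pvMainEq (symbols : List (List (String × String))) :
    render_symbols_section_py symbols = render_symbols_section_py_alt symbols := by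
  have hA : (symbols.foldl pvStepA ([], PySem.Set.empty)).1 = pvG PySem.Set.empty symbols := by
    rw [pvFoldA]; simp
  have hB : ((PySem.List.sorted (symbols.filter pvPublicPred) (fun x => pvName x) false).foldl
      pvStepD ([], none)).1
      = pvH none (PySem.List.sorted (symbols.filter pvPublicPred) (fun x => pvName x) false) := by
    rw [pvFoldD]; simp
  have hpwS : (PySem.List.sorted (symbols.filter pvPublicPred) (fun x => pvName x) false).Pairwise
      (fun a b => pvName a ≤ pvName b) := PySem.List.sorted_pairwise _ _
  have hleNone : ∀ s ∈ PySem.List.sorted (symbols.filter pvPublicPred) (fun x => pvName x) false,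
      pvPrevLe none s := fun _ _ p hp => by cases hp
  have hfilters : ∀ k,
      (pvH none (PySem.List.sorted (symbols.filter pvPublicPred) (fun x => pvName x) false)).filter
        (pvByName k)
      = (pvG PySem.Set.empty symbols).filter (pvByName k) := by
    intro k
    rw [pvHFilter _ none k hpwS hleNone, if_neg (by simp),
      pvGFilter symbols PySem.Set.empty k, if_neg (by simp [PySem.Set.empty]),
      pvSortStable]
  have hndG : (pvG PySem.Set.empty symbols).Nodup :=
    (pvGNodup symbols PySem.Set.empty).1.of_map
  have hpwH := (pvHPairwise _ none hpwS hleNone).1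
  have hndH : (pvH none (PySem.List.sorted (symbols.filter pvPublicPred) (fun x => pvName x) false)).Nodup :=
    hpwH.imp (fun hab => fun he => absurd hab (by rw [he]; exact lt_irrefl _))
  have hperm : (pvH none (PySem.List.sorted (symbols.filter pvPublicPred) (fun x => pvName x) false)).Perm
      (pvG PySem.Set.empty symbols) :=
    (List.perm_ext_iff_of_nodup hndH hndG).mpr (pvMemOfFilterEq hfilters)
  have hE : PySem.List.sorted (pvG PySem.Set.empty symbols) (fun x => pvName x) false
      = pvH none (PySem.List.sorted (symbols.filter pvPublicPred) (fun x => pvName x) false) :=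
    PySem.List.sorted_eq_of_perm_of_pairwise_lt _ _ _ hperm hpwH
  have hiff : pvG PySem.Set.empty symbols = []
      ↔ pvH none (PySem.List.sorted (symbols.filter pvPublicPred) (fun x => pvName x) false) = [] := by
    constructor
    · intro hz; rw [hz] at hperm; exact hperm.eq_nil
    · intro hz; rw [hz] at hperm; exact hperm.symm.eq_nil
  by_cases hs : symbols = []
  · subst hs; rfl
  · simp only [render_symbols_section_py, render_symbols_section_py_alt, if_neg hs, hA, hB]
    by_cases hG : pvG PySem.Set.empty symbols = []
    · rw [if_pos hG, if_pos (hiff.mp hG)]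
    · rw [if_neg hG, if_neg (fun hz => hG (hiff.mpr hz)), hE]

-- ===== VERDICT (by name: the statement is the Claim_ definition above) =====
theorem render_symbols_section_py_spec : Claim_equal_render_symbols_section_py := by
  intro symbols _ _
  unfold Spec_render_symbols_section_py
  exact pvMainEq symbols
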